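-- pv_equiv track=rewrite | github.com/kaiserthe13th/aoc2025 | 12/sol.py | shape_variations_by_flip_and_rot
-- ===== SOURCE A (Python) =====
-- def normalize_coords(coords: list[tuple[int, int]]) -> tuple[tuple[int, int], ...]:
--     # make coords so that the top left coord is at (0,0) and sort them
--     if not coords:
--         return tuple()
--     min_r = min(r for r, c in coords)
--     min_c = min(c for r, c in coords)
--     normalized = [(r - min_r, c - min_c) for r, c in coords]
--     normalized.sort()
--     return tuple(normalized)
--
-- def shape_variations_by_flip_and_rot(base_shape: list[tuple[int, int]]) -> list[tuple[tuple[int, int], ...]]: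
--     # flipped: F, rotated by <nn> degrees clockwise: <nn>deg
--     # generates: 0deg, 90deg, F180deg, F270deg, F0deg, F90deg, F180deg, F270deg.
--     variations = set()
--     current = base_shape
--     # try 4 rotations
--     for _ in range(4):
--         # rotate 90 degrees clockwise: (r, c): (c, -r)
--         current = [(c, -r) for r, c in current]
--         variations.add(normalize_coords(current))
--         # flip horizontally: (r, c): (r, -c)
--         flipped = [(r, -c) for r, c in current]
--         variations.add(normalize_coords(flipped))
--     return list(variations)
-- ===== SOURCE B (Python) =====
-- def normalize_coords(coords: list[tuple[int, int]]) -> tuple[tuple[int, int], ...]: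
--     # make coords so that the top left coord is at (0,0) and sort them
--     if not coords:
--         return tuple()
--     min_r = min(r for r, c in coords)
--     min_c = min(c for r, c in coords)
--     normalized = [(r - min_r, c - min_c) for r, c in coords]
--     normalized.sort()
--     return tuple(normalized)
--
-- def shape_variations_by_flip_and_rot(base_shape: list[tuple[int, int]]) -> list[tuple[tuple[int, int], ...]]:
--     # the 8 dihedral coordinate maps applied directly to the base shape
--     # (listed in the enumeration order of the rotate-then-flip loop)
--     maps = [
--         lambda r, c: (c, -r),    # 90deg
--         lambda r, c: (c, r),     # flipped 90deg
--         lambda r, c: (-r, -c),   # 180deg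
--         lambda r, c: (-r, c),    # flipped 180deg
--         lambda r, c: (-c, r),    # 270deg
--         lambda r, c: (-c, -r),   # flipped 270deg
--         lambda r, c: (r, c),     # 0deg
--         lambda r, c: (r, -c),    # flipped 0deg
--     ]
--     variations = set()
--     for m in maps:
--         variations.add(normalize_coords([m(r, c) for r, c in base_shape]))
--     return list(variations)
-- ===== Notes on version B (the rewrite author's own statement) =====
-- stated objective: alternative
-- what changed: Replaces the mutable `current` accumulator that chains 90-degree rotations (rotate, add, flip, add, four times) with a fixed table of the 8 dihedral coordinate maps, each applied directly to the base shape in one loop.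
import Mathlib
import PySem

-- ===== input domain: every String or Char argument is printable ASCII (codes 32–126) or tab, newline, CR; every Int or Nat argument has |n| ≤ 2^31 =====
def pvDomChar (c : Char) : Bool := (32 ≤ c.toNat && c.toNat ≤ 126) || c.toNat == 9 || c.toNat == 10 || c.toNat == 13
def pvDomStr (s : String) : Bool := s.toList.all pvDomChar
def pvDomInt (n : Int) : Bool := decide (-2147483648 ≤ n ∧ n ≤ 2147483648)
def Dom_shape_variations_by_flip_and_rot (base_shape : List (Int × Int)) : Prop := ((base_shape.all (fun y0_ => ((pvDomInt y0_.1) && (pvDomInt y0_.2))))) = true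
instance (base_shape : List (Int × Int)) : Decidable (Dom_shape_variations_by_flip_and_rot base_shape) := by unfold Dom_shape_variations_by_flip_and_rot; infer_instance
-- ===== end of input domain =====

-- B replaces the chained rotate/flip accumulator by the 8 explicit dihedral coordinate maps
-- applied directly to the base shape (objective: alternative decomposition, same cost).

-- ===== PORT A =====
-- shared module helper normalize_coords (identical in Source A and Source B)
def normalize_coords (coords : List (Int × Int)) : List (Int × Int) :=
  if coords = [] then []
  else
    -- min over a nonempty list: the getD default is unreachable
    let min_r := (PySem.List.min? (coords.map (fun rc => rc.1)) (fun x => x)).getD 0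
    let min_c := (PySem.List.min? (coords.map (fun rc => rc.2)) (fun x => x)).getD 0
    PySem.List.sorted2 (coords.map (fun rc => (rc.1 - min_r, rc.2 - min_c)))
      (fun p => p.1) (fun p => p.2) false

def shape_variations_by_flip_and_rot (base_shape : List (Int × Int)) : List (List (Int × Int)) :=
  -- variations = set(); current = base_shape; for _ in range(4): rotate, add, flip, add
  ((PySem.List.pyRange 0 4 1).foldl
    (fun (st : List (Int × Int) × PySem.Set (List (Int × Int))) _ =>
      let current := st.1.map (fun rc => (rc.2, -rc.1))
      let vars := PySem.Set.add st.2 (normalize_coords current)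
      let flipped := current.map (fun rc => (rc.1, -rc.2))
      (current, PySem.Set.add vars (normalize_coords flipped)))
    (base_shape, PySem.Set.empty)).2

-- ===== PORT B =====
-- the 8 dihedral coordinate maps, in the enumeration order of the rotate-then-flip loop
def pvDihedralMaps : List ((Int × Int) → (Int × Int)) :=
  [ fun rc => (rc.2, -rc.1),   -- 90deg
    fun rc => (rc.2, rc.1),    -- flipped 90deg
    fun rc => (-rc.1, -rc.2),  -- 180deg
    fun rc => (-rc.1, rc.2),   -- flipped 180deg
    fun rc => (-rc.2, rc.1),   -- 270deg
    fun rc => (-rc.2, -rc.1),  -- flipped 270deg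
    fun rc => (rc.1, rc.2),    -- 0deg
    fun rc => (rc.1, -rc.2) ]  -- flipped 0deg

def shape_variations_by_flip_and_rot_alt (base_shape : List (Int × Int)) : List (List (Int × Int)) :=
  pvDihedralMaps.foldl
    (fun (variations : PySem.Set (List (Int × Int))) m =>
      PySem.Set.add variations (normalize_coords (base_shape.map m)))
    PySem.Set.empty

-- ===== PRECONDITION & SPEC =====
def Spec_shape_variations_by_flip_and_rot (base_shape : List (Int × Int)) (out : List (List (Int × Int))) : Prop := out = shape_variations_by_flip_and_rot_alt base_shape
instance (base_shape : List (Int × Int)) (out : List (List (Int × Int))) : Decidable (Spec_shape_variations_by_flip_and_rot base_shape out) := by unfold Spec_shape_variations_by_flip_and_rot; infer_instance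

-- ===== CLAIM (what is proved, stated in full; the proofs are below) =====
def Claim_equal_shape_variations_by_flip_and_rot : Prop := ∀ (base_shape : List (Int × Int)), Dom_shape_variations_by_flip_and_rot base_shape → Spec_shape_variations_by_flip_and_rot base_shape (shape_variations_by_flip_and_rot base_shape)

-- ===== LEMMAS AND PROOFS =====

-- ===== VERDICT (by name: the statement is the Claim_ definition above) =====
theorem shape_variations_by_flip_and_rot_spec : Claim_equal_shape_variations_by_flip_and_rot := by
  intro base_shape _
  unfold Spec_shape_variations_by_flip_and_rot
  unfold shape_variations_by_flip_and_rot shape_variations_by_flip_and_rot_alt pvDihedralMaps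
  have hr : PySem.List.pyRange 0 4 1 = [0, 1, 2, 3] := by decide
  rw [hr]
  simp [List.foldl, List.map_map, Function.comp_def]
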